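-- pv_equiv track=rewrite | github.com/gkgksngy/CVR-APP | app.py | format_hour_range
-- ===== SOURCE A (Python) =====
-- def format_hour_range(hours):
--     if not hours:
--         return "-"
--     hours = sorted(hours)
--     ranges = []
--     start = hours[0]
--     prev = hours[0]
--     for h in hours[1:]:
--         if h == prev + 1:
--             prev = h
--         else:
--             ranges.append((start, prev + 1))
--             start = h
--             prev = h
--     ranges.append((start, prev + 1))
--     return ", ".join([f"{s:02d}:00 ~ {e:02d}:00" for s, e in ranges])
-- ===== SOURCE B (Python) =====
-- def format_hour_range(hours):
--     if not hours:
--         return "-"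
--     hs = sorted(hours)
--     n = len(hs)
--     bounds = [0] + [i for i in range(1, n) if hs[i] != hs[i - 1] + 1] + [n]
--     parts = [f"{hs[a]:02d}:00 ~ {hs[b - 1] + 1:02d}:00"
--              for a, b in zip(bounds, bounds[1:])]
--     return ", ".join(parts)
-- ===== Notes on version B (the rewrite author's own statement) =====
-- stated objective: alternative
-- what changed: Replaces A's start/prev state machine with an index-based pass: collect the break indices where hs[i] != hs[i-1]+1 into a bounds list and format each consecutive (a,b) bounds pair directly.
import Mathlib
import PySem

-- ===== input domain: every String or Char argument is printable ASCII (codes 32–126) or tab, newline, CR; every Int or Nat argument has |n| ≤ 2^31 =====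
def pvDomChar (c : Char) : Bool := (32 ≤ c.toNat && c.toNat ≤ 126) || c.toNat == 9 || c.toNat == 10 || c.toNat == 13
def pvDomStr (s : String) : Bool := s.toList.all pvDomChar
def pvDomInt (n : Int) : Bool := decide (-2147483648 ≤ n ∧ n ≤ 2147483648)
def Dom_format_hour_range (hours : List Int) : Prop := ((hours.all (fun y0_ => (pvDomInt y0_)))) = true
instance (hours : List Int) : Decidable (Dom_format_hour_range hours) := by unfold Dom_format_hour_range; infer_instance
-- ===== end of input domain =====

-- B replaces A's start/prev state machine with break indices + bounds pairs (objective: alternative, same cost).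

-- shared formatting helper: f"{s:02d}:00 ~ {e:02d}:00" (both Pythons format identically)
def pvFmt (s e : Int) : String :=
  PySem.Str.join "" [PySem.Str.zfill (PySem.Int.toStr s) 2, ":00 ~ ",
                     PySem.Str.zfill (PySem.Int.toStr e) 2, ":00"]

-- ===== PORT A =====
def format_hour_range (hours : List Int) : String :=
  if hours = [] then "-"
  else
    let hs := PySem.List.sorted hours (fun x => x) false
    let h0 := PySem.List.pyGetD hs 0 0   -- hours[0]; hs nonempty so in range
    let z := (PySem.List.slice hs (some 1) none).foldl
      (fun (acc : List (Int × Int) × Int × Int) h =>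
        if h = acc.2.2 + 1 then (acc.1, acc.2.1, h)
        else (acc.1 ++ [(acc.2.1, acc.2.2 + 1)], h, h)) ([], h0, h0)
    PySem.Str.join ", " ((z.1 ++ [(z.2.1, z.2.2 + 1)]).map (fun r => pvFmt r.1 r.2))

-- ===== PORT B =====
def format_hour_range_alt (hours : List Int) : String :=
  if hours = [] then "-"
  else
    let hs := PySem.List.sorted hours (fun x => x) false
    let n : Int := hs.length
    -- all indices below are in range, so pyGetD (with a dummy default) is exact
    let bounds := 0 :: (PySem.List.pyRange 1 n 1).filter
        (fun i => PySem.List.pyGetD hs i 0 ≠ PySem.List.pyGetD hs (i - 1) 0 + 1) ++ [n]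
    let parts := (bounds.zip (PySem.List.slice bounds (some 1) none)).map
        (fun ab => pvFmt (PySem.List.pyGetD hs ab.1 0) (PySem.List.pyGetD hs (ab.2 - 1) 0 + 1))
    PySem.Str.join ", " parts

-- ===== PRECONDITION & SPEC =====
def Spec_format_hour_range (hours : List Int) (out : String) : Prop := out = format_hour_range_alt hours
instance (hours : List Int) (out : String) : Decidable (Spec_format_hour_range hours out) := by unfold Spec_format_hour_range; infer_instance

-- ===== CLAIM (what is proved, stated in full; the proofs are below) =====
def Claim_equal_format_hour_range : Prop := ∀ (hours : List Int), Dom_format_hour_range hours → Spec_format_hour_range hours (format_hour_range hours)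

-- ===== LEMMAS AND PROOFS =====

-- proof-side recursive description of the run decomposition
def pvRuns (s p : Int) : List Int → List (Int × Int)
  | [] => [(s, p + 1)]
  | h :: t => if h = p + 1 then pvRuns s h t else (s, p + 1) :: pvRuns h h t

def pvRunEnd (p : Int) : List Int → Int
  | [] => p + 1
  | h :: t => if h = p + 1 then pvRunEnd h t else p + 1

def pvRunRest (p : Int) : List Int → List (Int × Int)
  | [] => []
  | h :: t => if h = p + 1 then pvRunRest h t else pvRuns h h t

lemma pvRuns_eq (s p : Int) (t : List Int) :
    pvRuns s p t = (s, pvRunEnd p t) :: pvRunRest p t := by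
  induction t generalizing s p with
  | nil => rfl
  | cons h t ih =>
    simp only [pvRuns, pvRunEnd, pvRunRest]
    by_cases hc : h = p + 1 <;> simp [hc, ih]

-- A's loop accumulates exactly pvRuns
lemma pvFoldA (t : List Int) : ∀ (r : List (Int × Int)) (s p : Int),
    (t.foldl
      (fun (acc : List (Int × Int) × Int × Int) h =>
        if h = acc.2.2 + 1 then (acc.1, acc.2.1, h)
        else (acc.1 ++ [(acc.2.1, acc.2.2 + 1)], h, h)) (r, s, p)).1 ++
      [((t.foldl
      (fun (acc : List (Int × Int) × Int × Int) h =>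
        if h = acc.2.2 + 1 then (acc.1, acc.2.1, h)
        else (acc.1 ++ [(acc.2.1, acc.2.2 + 1)], h, h)) (r, s, p)).2.1,
        (t.foldl
      (fun (acc : List (Int × Int) × Int × Int) h =>
        if h = acc.2.2 + 1 then (acc.1, acc.2.1, h)
        else (acc.1 ++ [(acc.2.1, acc.2.2 + 1)], h, h)) (r, s, p)).2.2 + 1)] = r ++ pvRuns s p t := by
  induction t with
  | nil => intro r s p; simp [pvRuns]
  | cons h t ih =>
    intro r s p
    by_cases hc : h = p + 1
    · simp only [List.foldl_cons, pvRuns, if_pos hc]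
      exact ih r s h
    · simp only [List.foldl_cons, pvRuns, if_neg hc]
      rw [ih (r ++ [(s, p + 1)]) h h, List.append_assoc]
      rfl

-- B-side: cuts, bounds, pairs
def pvCuts (l : List Int) : List Int :=
  (PySem.List.pyRange 1 (l.length : Int) 1).filter
    (fun i => PySem.List.pyGetD l i 0 ≠ PySem.List.pyGetD l (i - 1) 0 + 1)

def pvBounds (l : List Int) : List Int := 0 :: pvCuts l ++ [(l.length : Int)]

def pvF (l : List Int) (ab : Int × Int) : Int × Int :=
  (PySem.List.pyGetD l ab.1 0, PySem.List.pyGetD l (ab.2 - 1) 0 + 1)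

def pvPairs (l : List Int) : List (Int × Int) :=
  ((pvBounds l).zip (pvBounds l).tail).map (pvF l)

lemma pvCuts_mem (l : List Int) : ∀ x ∈ pvCuts l, 1 ≤ x ∧ x < (l.length : Int) := by
  intro x hx
  have := List.of_mem_filter hx
  have hm := List.mem_of_mem_filter hx
  rw [PySem.List.mem_pyRange_one] at hm
  exact hm

lemma pvBounds_nonneg (l : List Int) : ∀ x ∈ pvBounds l, 0 ≤ x := by
  intro x hx
  rcases List.mem_cons.mp hx with rfl | hx2
  · exact le_refl 0
  · rcases List.mem_append.mp hx2 with h | h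
    · have := (pvCuts_mem l x h).1; omega
    · have hx3 : x = (l.length : Int) := by simpa using h
      subst hx3; positivity

lemma pvBounds_tail_pos (l : List Int) (hl : l ≠ []) : ∀ x ∈ (pvBounds l).tail, 1 ≤ x := by
  intro x hx
  simp only [pvBounds] at hx
  rcases List.mem_append.mp hx with h | h
  · exact (pvCuts_mem l x h).1
  · have hx3 : x = (l.length : Int) := by simpa using h
    have : 0 < l.length := List.length_pos_iff.mpr hl
    omega

-- index shift: pyGetD (h::t) (i+1) = pyGetD t i for 0 ≤ i
lemma pvShift (h : Int) (t : List Int) (i : Int) (hi : 0 ≤ i) :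
    PySem.List.pyGetD (h :: t) (i + 1) 0 = PySem.List.pyGetD t i 0 := by
  obtain ⟨k, rfl⟩ := Int.eq_ofNat_of_zero_le hi
  have : ((k : Int) + 1) = ((k + 1 : Nat) : Int) := by push_cast; ring
  rw [this, PySem.List.pyGetD_natCast, PySem.List.pyGetD_natCast]
  simp

-- cuts of a cons
lemma pvCuts_cons (h : Int) (t : List Int) (ht : t ≠ []) :
    pvCuts (h :: t) =
      (if PySem.List.pyGetD t 0 0 = h + 1 then [] else [1]) ++ (pvCuts t).map (· + 1) := by
  have hlen : 0 < t.length := List.length_pos_iff.mpr ht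
  have h1 : ((h :: t).length : Int) = (t.length : Int) + 1 := by push_cast [List.length_cons]; ring
  unfold pvCuts
  rw [h1]
  have hsplit : PySem.List.pyRange 1 ((t.length : Int) + 1) 1 =
      1 :: PySem.List.pyRange 2 ((t.length : Int) + 1) 1 := by
    have h2 := PySem.List.pyRange_one_cons (a := 1) (b := (t.length : Int) + 1) (by omega)
    norm_num at h2
    exact h2
  rw [hsplit]
  have hmap : PySem.List.pyRange 2 ((t.length : Int) + 1) 1 =
      (PySem.List.pyRange 1 (t.length : Int) 1).map (· + 1) := by
    rw [PySem.List.pyRange_one, PySem.List.pyRange_one]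
    have : ((t.length : Int) + 1 - 2).toNat = ((t.length : Int) - 1).toNat := by omega
    rw [this, List.map_map]
    apply List.map_congr_left
    intro k _
    simp; ring
  rw [hmap, List.filter_cons]
  have hc1 : PySem.List.pyGetD (h :: t) 1 0 = PySem.List.pyGetD t 0 0 := by
    have := pvShift h t 0 le_rfl
    simpa using this
  have hc0 : PySem.List.pyGetD (h :: t) (1 - 1) 0 = h := by
    norm_num [PySem.List.pyGetD_zero_cons]
  rw [List.filter_map]
  have hfc : ∀ i ∈ PySem.List.pyRange 1 (t.length : Int) 1,
      (decide (¬ PySem.List.pyGetD (h :: t) (i + 1) 0 = PySem.List.pyGetD (h :: t) (i + 1 - 1) 0 + 1)) =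
      (decide (¬ PySem.List.pyGetD t i 0 = PySem.List.pyGetD t (i - 1) 0 + 1)) := by
    intro i hi
    rw [PySem.List.mem_pyRange_one] at hi
    have e1 : PySem.List.pyGetD (h :: t) (i + 1) 0 = PySem.List.pyGetD t i 0 :=
      pvShift h t i (by omega)
    have e2 : PySem.List.pyGetD (h :: t) (i + 1 - 1) 0 = PySem.List.pyGetD t (i - 1) 0 + 0 := by
      have : i + 1 - 1 = (i - 1) + 1 := by ring
      rw [this, pvShift h t (i - 1) (by omega)]; ring
    rw [e1, e2]; norm_num
  have hfilter : List.filter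
      ((fun i => decide (¬ PySem.List.pyGetD (h :: t) i 0 = PySem.List.pyGetD (h :: t) (i - 1) 0 + 1)) ∘ (· + 1))
      (PySem.List.pyRange 1 (t.length : Int) 1)
      = List.filter (fun i => decide (¬ PySem.List.pyGetD t i 0 = PySem.List.pyGetD t (i - 1) 0 + 1))
      (PySem.List.pyRange 1 (t.length : Int) 1) := by
    apply List.filter_congr
    intro i hi
    exact hfc i hi
  simp only [Function.comp] at hfilter ⊢
  rw [hfilter, hc1, hc0]
  by_cases hd : PySem.List.pyGetD t 0 0 = h + 1
  · simp [hd]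
  · simp [hd]

-- main: B's pairs are A's runs
lemma pvBounds_eq_cons (l : List Int) : pvBounds l = 0 :: (pvBounds l).tail := rfl

lemma pvBounds_tail (l : List Int) :
    (pvBounds l).tail = pvCuts l ++ [(l.length : Int)] := rfl

lemma pvBounds_tail_ne (l : List Int) : (pvBounds l).tail ≠ [] := by
  simp [pvBounds]

lemma pvPairs_eq (t : List Int) : ∀ h : Int, pvPairs (h :: t) = pvRuns h h t := by
  induction t with
  | nil =>
    intro h
    unfold pvPairs pvBounds pvCuts pvF pvRuns
    simp [PySem.List.pyRange_one_eq_nil, PySem.List.pyGetD_zero_cons]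
  | cons h' t' ih =>
    intro h
    have ht : (h' :: t') ≠ [] := by simp
    have hcuts := pvCuts_cons h (h' :: t') ht
    have hget0 : PySem.List.pyGetD (h' :: t') 0 0 = h' := PySem.List.pyGetD_zero_cons _ _ _
    rw [hget0] at hcuts
    have hzipmap : ∀ u v : List Int, (∀ x ∈ u, 0 ≤ x) → (∀ y ∈ v, 1 ≤ y) →
        ((u.map (· + 1)).zip (v.map (· + 1))).map (pvF (h :: h' :: t')) =
        (u.zip v).map (pvF (h' :: t')) := by
      intro u v hu hv
      rw [List.zip_map, List.map_map]
      apply List.map_congr_left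
      intro p hp
      obtain ⟨hp1, hp2⟩ := List.of_mem_zip hp
      simp only [Function.comp, Prod.map, pvF]
      have e1 : PySem.List.pyGetD (h :: h' :: t') (p.1 + 1) 0 = PySem.List.pyGetD (h' :: t') p.1 0 :=
        pvShift _ _ _ (hu _ hp1)
      have e2 : PySem.List.pyGetD (h :: h' :: t') (p.2 + 1 - 1) 0 =
          PySem.List.pyGetD (h' :: t') (p.2 - 1) 0 := by
        have e : p.2 + 1 - 1 = (p.2 - 1) + 1 := by ring
        rw [e, pvShift _ _ _ (by have := hv _ hp2; omega)]
      rw [e1, e2]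
    have hlen1 : (((h :: h' :: t').length : Int)) = ((h' :: t').length : Int) + 1 := by
      push_cast [List.length_cons]; ring
    obtain ⟨r0, r', hr⟩ : ∃ r0 r', (pvBounds (h' :: t')).tail = r0 :: r' :=
      List.exists_cons_of_ne_nil (pvBounds_tail_ne _)
    have hr0pos : 1 ≤ r0 := pvBounds_tail_pos (h' :: t') ht r0 (by rw [hr]; simp)
    have hr'pos : ∀ y ∈ r', 1 ≤ y := fun y hy =>
      pvBounds_tail_pos (h' :: t') ht y (by rw [hr]; simp [hy])
    have hb0 : pvBounds (h' :: t') = 0 :: r0 :: r' := by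
      rw [pvBounds_eq_cons (h' :: t'), hr]
    have hpt : pvPairs (h' :: t') = pvRuns h' h' t' := ih h'
    by_cases hc : h' = h + 1
    · -- run continues through h'
      have hbounds : pvBounds (h :: h' :: t') = 0 :: ((pvBounds (h' :: t')).tail).map (· + 1) := by
        rw [pvBounds_tail]
        show (0 : Int) :: pvCuts (h :: h' :: t') ++ [(((h :: h' :: t').length : Int))] =
            0 :: (pvCuts (h' :: t') ++ [(((h' :: t').length : Int))]).map (· + 1)
        rw [hcuts, if_pos hc]
        simp
      have hrnn : ∀ x ∈ r0 :: r', 0 ≤ x := by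
        intro x hx
        rcases List.mem_cons.mp hx with rfl | hx
        · omega
        · have := hr'pos x hx; omega
      unfold pvPairs
      rw [hbounds, hr, List.map_cons]
      simp only [List.tail_cons, List.zip_cons_cons, List.map_cons]
      have hhead : pvF (h :: h' :: t') (0, r0 + 1) = (h, PySem.List.pyGetD (h' :: t') (r0 - 1) 0 + 1) := by
        unfold pvF
        have e2 : PySem.List.pyGetD (h :: h' :: t') (r0 + 1 - 1) 0 =
            PySem.List.pyGetD (h' :: t') (r0 - 1) 0 := by
          have e : r0 + 1 - 1 = (r0 - 1) + 1 := by ring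
          rw [e, pvShift _ _ _ (by omega)]
        simp only [e2, PySem.List.pyGetD_zero_cons]
      rw [hhead]
      have htail := hzipmap (r0 :: r') r' hrnn hr'pos
      rw [List.map_cons] at htail
      rw [htail]
      -- use the IH, decomposed with pvRuns_eq
      unfold pvPairs at hpt
      rw [hb0] at hpt
      simp only [List.tail_cons, List.zip_cons_cons, List.map_cons] at hpt
      rw [pvRuns_eq h' h' t'] at hpt
      have hf0 : pvF (h' :: t') (0, r0) = (h', PySem.List.pyGetD (h' :: t') (r0 - 1) 0 + 1) := by
        unfold pvF
        simp only [PySem.List.pyGetD_zero_cons]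
      rw [hf0] at hpt
      have hE : PySem.List.pyGetD (h' :: t') (r0 - 1) 0 + 1 = pvRunEnd h' t' :=
        congrArg Prod.snd (List.head_eq_of_cons_eq hpt)
      have hR : ((r0 :: r').zip r').map (pvF (h' :: t')) = pvRunRest h' t' :=
        List.tail_eq_of_cons_eq hpt
      have hstep : pvRuns h h (h' :: t') =
          if h' = h + 1 then pvRuns h h' t' else (h, h + 1) :: pvRuns h' h' t' := rfl
      rw [hE, hR, hstep, if_pos hc, pvRuns_eq h h' t']
    · -- run breaks at h'
      have hbounds : pvBounds (h :: h' :: t') = 0 :: (pvBounds (h' :: t')).map (· + 1) := by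
        show (0 : Int) :: pvCuts (h :: h' :: t') ++ [(((h :: h' :: t').length : Int))] =
            0 :: ((0 : Int) :: pvCuts (h' :: t') ++ [(((h' :: t').length : Int))]).map (· + 1)
        rw [hcuts, if_neg hc]
        simp
      have hbnn : ∀ x ∈ (0 : Int) :: r0 :: r', 0 ≤ x := by
        rw [← hb0]; exact pvBounds_nonneg _
      have hbtpos : ∀ y ∈ r0 :: r', 1 ≤ y := by
        rw [← hr]; exact pvBounds_tail_pos _ ht
      have hhead : pvF (h :: h' :: t') (0, 0 + 1) = (h, h + 1) := by
        unfold pvF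
        norm_num [PySem.List.pyGetD_zero_cons]
      have hstep : pvRuns h h (h' :: t') =
          if h' = h + 1 then pvRuns h h' t' else (h, h + 1) :: pvRuns h' h' t' := rfl
      have htail := hzipmap (0 :: r0 :: r') (r0 :: r') hbnn hbtpos
      unfold pvPairs at hpt ⊢
      rw [hb0] at hpt
      rw [hbounds, hb0]
      simp only [List.tail_cons, List.map_cons, List.zip_cons_cons] at htail hpt ⊢
      rw [hhead, htail, hpt, hstep, if_neg hc]

-- sorted list is nonempty
lemma pvSorted_ne (hours : List Int) (h : hours ≠ []) :
    PySem.List.sorted hours (fun x => x) false ≠ [] := by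
  intro hc
  exact h ((PySem.List.sorted_eq_nil_iff _ _ _).mp hc)

-- ===== VERDICT (by name: the statement is the Claim_ definition above) =====
theorem format_hour_range_spec : Claim_equal_format_hour_range := by
  intro hours _
  unfold Spec_format_hour_range format_hour_range format_hour_range_alt
  by_cases hne : hours = []
  · simp [hne]
  · rw [if_neg hne, if_neg hne]
    dsimp only
    obtain ⟨h0, tl, hcons⟩ : ∃ h0 tl, PySem.List.sorted hours (fun x => x) false = h0 :: tl :=
      List.exists_cons_of_ne_nil (pvSorted_ne hours hne)
    rw [hcons, PySem.List.pyGetD_zero_cons]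
    have hslice : PySem.List.slice (h0 :: tl) (some 1) none = tl := by
      rw [show (1 : Int) = ((1 : Nat) : Int) from rfl, PySem.List.slice_from_natCast]
      simp
    rw [hslice]
    rw [pvFoldA tl [] h0 h0, List.nil_append]
    -- B side
    rw [show (0 :: (PySem.List.pyRange 1 (((h0 :: tl).length : Int)) 1).filter
          (fun i => PySem.List.pyGetD (h0 :: tl) i 0 ≠ PySem.List.pyGetD (h0 :: tl) (i - 1) 0 + 1)
          ++ [(((h0 :: tl).length : Int))]) = pvBounds (h0 :: tl) from rfl]
    have hsl2 : PySem.List.slice (pvBounds (h0 :: tl)) (some 1) none = (pvBounds (h0 :: tl)).tail := by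
      rw [show (1 : Int) = ((1 : Nat) : Int) from rfl, PySem.List.slice_from_natCast]
      exact List.drop_one
    rw [hsl2]
    have hP : ((pvBounds (h0 :: tl)).zip (pvBounds (h0 :: tl)).tail).map
        (fun ab => pvFmt (PySem.List.pyGetD (h0 :: tl) ab.1 0) (PySem.List.pyGetD (h0 :: tl) (ab.2 - 1) 0 + 1))
        = (pvPairs (h0 :: tl)).map (fun r => pvFmt r.1 r.2) := by
      unfold pvPairs
      rw [List.map_map]
      rfl
    rw [hP, pvPairs_eq tl h0]
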